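-- pv_equiv track=rewrite | github.com/chao-mu/aoc2021 | src/day8.py | backward_search
-- ===== SOURCE A (Python) =====
-- import copy
--
-- Numbers = {
--     "abcefg": 0,
--     "cf": 1,
--     "acdeg": 2,
--     "acdfg": 3,
--     "bcdf": 4,
--     "abdfg": 5,
--     "abdefg": 6,
--     "acf": 7,
--     "abcdefg": 8,
--     "abcdfg": 9
-- }
--
-- def backward_search(assignments, patterns):
--     unassigned = None
--     domain = set("abcdefg")
--     for s, e in assignments.items():
--         if e == "*":
--             unassigned = s
--         else:
--             domain.remove(e)
--
--     if unassigned is None: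
--         return assignments
--
--     for d in domain:
--         local = copy.deepcopy(assignments)
--         local[unassigned] = d
--         if consistent(local, patterns):
--             local = backward_search(local, patterns)
--             if local is not None:
--                 return local
--
--     return None
--
-- def consistent(assignments, patterns):
--     for pattern in patterns:
--         new_str = "".join(assignments[s] for s in pattern)
--         candidates = [s for s in Numbers if len(s) == len(new_str)]
--         candidate_found = False
--
--         for candidate in candidates:
--             matched = True
--             for idx, char in enumerate(new_str):
--                 if char != "*" and char not in candidate:
--                     matched = False
--                     break
--
--             if matched:
--                 candidate_found = True
--
--         if not candidate_found:
--             return False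
--
--     return True
-- ===== SOURCE B (Python) =====
-- Numbers = {
--     "abcefg": 0,
--     "cf": 1,
--     "acdeg": 2,
--     "acdfg": 3,
--     "bcdf": 4,
--     "abdfg": 5,
--     "abdefg": 6,
--     "acf": 7,
--     "abcdefg": 8,
--     "abcdfg": 9
-- }
--
-- def consistent(assignments, patterns):
--     for pattern in patterns:
--         new_str = "".join(assignments[s] for s in pattern)
--         candidates = [s for s in Numbers if len(s) == len(new_str)]
--         candidate_found = False
--
--         for candidate in candidates:
--             matched = True
--             for idx, char in enumerate(new_str):
--                 if char != "*" and char not in candidate: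
--                     matched = False
--                     break
--
--             if matched:
--                 candidate_found = True
--
--         if not candidate_found:
--             return False
--
--     return True
--
-- def backward_search(assignments, patterns):
--     # Compute the stack of unassigned segments and the pool of free wires once,
--     # then run a plain DFS over those with shallow copies, shrinking the pool as
--     # wires get taken.
--     stack = [k for k, v in assignments.items() if v == "*"]
--     avail = set("abcdefg")
--     for v in assignments.values():
--         if v != "*":
--             avail.remove(v)
--
--     def solve(assign, stack, avail):
--         if not stack:
--             return assign
--         k = stack[-1]
--         for w in sorted(avail):
--             local = dict(assign)
--             local[k] = w
--             if consistent(local, patterns):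
--                 found = solve(local, stack[:-1], avail - {w})
--                 if found is not None:
--                     return found
--         return None
--
--     return solve(dict(assignments), stack, avail)
-- ===== Notes on version B (the rewrite author's own statement) =====
-- stated objective: alternative
-- what changed: B computes the stack of '*' segments and the pool of free wires once up front and runs a plain DFS over those (pop from the stack, shallow dict copies, sorted wire order, pool shrunk by set difference), instead of A's re-scanning the whole dict, rebuilding the domain set and deep-copying at every node of the search tree; Pre_ excludes inputs where the programs raise KeyError (duplicate or non-wire assigned values, pattern letters that are not keys) and inputs with more than one consistent complete assignment, where A's answer depends on hash-seeded set iteration order.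
-- outside the precondition, e.g. on backward_search({'k': '*'}, []): A returns {'k': 'd'}, B returns {'k': 'a'}; on backward_search({'k': '*', 'c': 'c', 'x': 'c'}, []): A raises KeyError, B raises KeyError
import Mathlib
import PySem

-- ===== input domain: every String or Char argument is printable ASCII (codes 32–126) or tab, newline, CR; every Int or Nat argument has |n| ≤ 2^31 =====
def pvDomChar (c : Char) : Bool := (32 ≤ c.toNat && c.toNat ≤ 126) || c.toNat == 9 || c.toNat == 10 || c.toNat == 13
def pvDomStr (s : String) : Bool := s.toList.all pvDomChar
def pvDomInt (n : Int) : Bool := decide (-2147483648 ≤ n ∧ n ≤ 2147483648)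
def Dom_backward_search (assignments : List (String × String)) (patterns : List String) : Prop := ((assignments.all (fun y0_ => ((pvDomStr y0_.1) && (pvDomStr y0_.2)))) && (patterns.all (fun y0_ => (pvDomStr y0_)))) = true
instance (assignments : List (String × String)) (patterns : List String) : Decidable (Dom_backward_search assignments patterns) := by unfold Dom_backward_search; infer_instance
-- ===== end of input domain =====

-- B computes the stack of unassigned segments and the pool of free wires once and runs a plain DFS
-- over those lists (pop from the stack, shallow copies), instead of rescanning the whole dict and
-- rebuilding the domain set at every search node (objective: alternative).

-- ===== SHARED HELPERS (the dict primitives and the `consistent` helper, which Source B keeps verbatim) =====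

-- the seven wire letters; Python's set("abcdefg").  CPython iterates this set in hash order, which
-- PySem does not model; both ports iterate it in the textual order.  Pre_ below restricts the claim
-- to inputs whose result does not depend on that order (at most one solution), where it is exact.
def pvLetters : List String := ["a", "b", "c", "d", "e", "f", "g"]

-- the keys of the module constant `Numbers`, in insertion order
def pvNumbersKeys : List (List Char) :=
  ["abcefg".toList, "cf".toList, "acdeg".toList, "acdfg".toList, "bcdf".toList,
   "abdfg".toList, "abdefg".toList, "acf".toList, "abcdefg".toList, "abcdfg".toList]

-- d[k] (first match; exact for a Python dict, whose keys are unique)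
def pvLookup? : List (String × String) → String → Option String
  | [], _ => none
  | (a, b) :: rest, k => if a = k then some b else pvLookup? rest k

-- d[k] = v on an existing key: overwrite in place (exact for a Python dict; new keys append)
def pvSetKey : List (String × String) → String → String → List (String × String)
  | [], k, v => [(k, v)]
  | (a, b) :: rest, k, v => if a = k then (a, v) :: rest else (a, b) :: pvSetKey rest k v

-- set.remove(e): KeyError (none) when absent; our domain lists are duplicate-free, so
-- removing-as-filter is exact for the Python set.
def pvRemoveWire (dom : List String) (e : String) : Option (List String) :=
  if dom.contains e then some (dom.filter (fun w => w ≠ e)) else none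

-- `consistent(assignments, patterns)`: none = KeyError while building new_str (a pattern letter
-- that is not a key); the candidate flag-loop is ported as `any`, the inner break-loop as `all`.
def pvConsistent (assignments : List (String × String)) : List String → Option Bool
  | [] => some true
  | p :: ps =>
    match p.toList.mapM (fun c => pvLookup? assignments (String.singleton c)) with
    | none => none
    | some vals =>
      let newStr := (vals.map String.toList).flatten
      let candidates := pvNumbersKeys.filter (fun s => s.length = newStr.length)
      if candidates.any (fun cand => newStr.all (fun ch => ch == '*' || cand.contains ch)) then
        pvConsistent assignments ps
      else some false

-- ===== PORT A =====

-- the single scan of assignments.items(): last '*' key, and domain after the removals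
def pvScanStep (acc : Option String × Option (List String)) (p : String × String) :
    Option String × Option (List String) :=
  if p.2 = "*" then (some p.1, acc.2) else (acc.1, acc.2.bind (fun d => pvRemoveWire d p.2))

-- the `for d in domain:` loop (first branch returning a solution wins); `recur` is the recursive
-- call of backward_search with one unit of fuel spent.  none from pvConsistent (KeyError) aborts.
def pvLoopA (recur : List (String × String) → Option (List (String × String)))
    (assignments : List (String × String)) (patterns : List String) (u : String) :
    List String → Option (List (String × String))
  | [] => none
  | d :: ds =>
    match pvConsistent (pvSetKey assignments u d) patterns with
    | none => none
    | some false => pvLoopA recur assignments patterns u ds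
    | some true =>
      match recur (pvSetKey assignments u d) with
      | some r => some r
      | none => pvLoopA recur assignments patterns u ds

-- fuel-guarded recursion (guard only: each level fills one '*', so `length + 1` never runs out on
-- a dict, whose keys are unique)
def pvGoA : Nat → List (String × String) → List String → Option (List (String × String))
  | 0, _, _ => none
  | Nat.succ fuel, assignments, patterns =>
    let st := assignments.foldl pvScanStep (none, some pvLetters)
    match st.1 with
    | none => some assignments
    | some u =>
      match st.2 with
      | none => none   -- KeyError from domain.remove (excluded by Pre_)
      | some domain => pvLoopA (fun l => pvGoA fuel l patterns) assignments patterns u domain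

def backward_search (assignments : List (String × String)) (patterns : List String) :
    Option (List (String × String)) :=
  pvGoA (assignments.length + 1) assignments patterns

-- ===== PORT B =====

-- stack = [k for k, v in assignments.items() if v == "*"]
def pvStarKeys (assignments : List (String × String)) : List String :=
  (assignments.filter (fun p => p.2 = "*")).map Prod.fst

-- the pool loop: avail = set("abcdefg"); for v in values: if v != "*": avail.remove(v)
-- (none = KeyError from set.remove, excluded by Pre_)
def pvAvailLoop (vals : List String) : Option (List String) :=
  vals.foldl (fun d v => if v = "*" then d else d.bind (fun dd => pvRemoveWire dd v))
    (some pvLetters)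

-- the `for w in sorted(avail):` loop of solve; `avail` is the full pool at this node, the last
-- argument the part still to try
def pvLoopB (recur : List (String × String) → List String → Option (List (String × String)))
    (patterns : List String) (assign : List (String × String)) (k : String)
    (avail : List String) : List String → Option (List (String × String))
  | [] => none
  | w :: ws =>
    match pvConsistent (pvSetKey assign k w) patterns with
    | none => none
    | some false => pvLoopB recur patterns assign k avail ws
    | some true =>
      match recur (pvSetKey assign k w) (PySem.Set.diff avail [w]) with
      | some r => some r
      | none => pvLoopB recur patterns assign k avail ws

-- solve(assign, stack, avail): empty stack returns assign; otherwise k = stack[-1] is filled from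
-- sorted(avail) and the recursion continues on stack[:-1] (recursion on the stack's length)
def pvGoB (patterns : List String) (assign : List (String × String)) (avail : List String)
    (stack : List String) : Option (List (String × String)) :=
  match h : stack.getLast? with
  | none => some assign
  | some k =>
      pvLoopB (fun loc av => pvGoB patterns loc av stack.dropLast) patterns assign k avail
        (PySem.List.sorted avail (fun x => x))
termination_by stack.length
decreasing_by
  have hne : stack ≠ [] := by intro he; rw [he] at h; simp at h
  have : 0 < stack.length := List.length_pos_iff.mpr hne
  simp [List.length_dropLast]; omega

def backward_search_alt (assignments : List (String × String)) (patterns : List String) :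
    Option (List (String × String)) :=
  match pvAvailLoop (assignments.map Prod.snd) with
  | none => none   -- KeyError from avail.remove (excluded by Pre_)
  | some avail => pvGoB patterns assignments avail (pvStarKeys assignments)

-- ===== PRECONDITION & SPEC =====

def pvNonstarVals (assignments : List (String × String)) : List String :=
  (assignments.map Prod.snd).filter (fun v => v ≠ "*")

def pvAvailOf (assignments : List (String × String)) : List String :=
  pvLetters.filter (fun w => !((pvNonstarVals assignments).contains w))

-- spec-level consistency of a COMPLETED assignment (no '*' left), used only by Pre_'s uniqueness
-- clause: every pattern maps (letter by letter) into some candidate digit-word of the same length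
def pvSpecOk (full : List (String × String)) (patterns : List String) : Bool :=
  patterns.all (fun p =>
    match p.toList.mapM (fun c => full.lookup (String.singleton c)) with
    | none => false
    | some vals =>
      let s := (vals.map String.toList).flatten
      pvNumbersKeys.any (fun cand => cand.length = s.length && s.all (fun ch => cand.contains ch)))

-- the assignment in which the '*' keys take, in order, the given wires (pure data, no search)
def pvFillStars (assigns : List (String × String)) (ws : List String) : List (String × String) :=
  assigns.map (fun p =>
    if p.2 = "*" then (p.1, (((pvStarKeys assigns).zip ws).lookup p.1).getD "") else p)

-- all ways to pick n distinct wires, in order, from the pool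
def pvPicks (avail : List String) : Nat → List (List String)
  | 0 => [[]]
  | Nat.succ n => avail.flatMap (fun w => (pvPicks (avail.filter (fun x => x ≠ w)) n).map (w :: ·))

def pvSolutionCount (assignments : List (String × String)) (patterns : List String) : Nat :=
  ((pvPicks (pvAvailOf assignments) (pvStarKeys assignments).length).filter
    (fun ws => pvSpecOk (pvFillStars assignments ws) patterns)).length

-- Pre_ excludes (a) inputs on which A raises KeyError — a duplicate or non-wire assigned value, or
-- (when the search runs) a pattern letter that is not a key of `assignments` — and (b) inputs with
-- more than one complete consistent assignment, on which A returns whichever solution CPython's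
-- hash-seeded set iteration order reaches first: a tie that no specification fixes (B, iterating
-- the wires alphabetically, may then pick another equally valid solution).
def Pre_backward_search (assignments : List (String × String)) (patterns : List String) : Prop :=
  (assignments.map Prod.fst).Nodup ∧
  (pvNonstarVals assignments).Nodup ∧
  (∀ v ∈ pvNonstarVals assignments, v ∈ pvLetters) ∧
  (pvStarKeys assignments ≠ [] →
    patterns.all (fun p =>
      p.toList.all (fun c => (assignments.map Prod.fst).contains (String.singleton c))) = true) ∧
  pvSolutionCount assignments patterns ≤ 1

instance (assignments : List (String × String)) (patterns : List String) :
    Decidable (Pre_backward_search assignments patterns) := by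
  unfold Pre_backward_search; infer_instance

def pvWitness_backward_search : (List (String × String)) × List String :=
  ([("b", "*"), ("c", "c"), ("f", "f")], ["cf", "bcf"])

def Spec_backward_search (assignments : List (String × String)) (patterns : List String)
    (out : Option (List (String × String))) : Prop :=
  out = backward_search_alt assignments patterns

instance (assignments : List (String × String)) (patterns : List String)
    (out : Option (List (String × String))) :
    Decidable (Spec_backward_search assignments patterns out) := by
  unfold Spec_backward_search; infer_instance

-- ===== CLAIM (what is proved, stated in full; the proofs are below) =====
def Claim_equal_backward_search : Prop := ∀ (assignments : List (String × String)) (patterns : List String), Dom_backward_search assignments patterns → Pre_backward_search assignments patterns → Spec_backward_search assignments patterns (backward_search assignments patterns)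

-- ===== LEMMAS AND PROOFS =====

-- The proofs use the first three clauses of Pre_: with valid assigned values, A's scan of the dict
-- yields exactly the (last '*' key, free-wire pool) state that B precomputes, and B's popping of
-- its stack selects exactly the key A's scan selects, so the two searches walk the same tree.
-- Clauses (4)/(5) restrict the claim to inputs on which the Python A (whose set iteration order is
-- hash-seeded and not modelled here) computes this same value.

def pvRemFold (d0 : Option (List String)) (vs : List String) : Option (List String) :=
  vs.foldl (fun d v => d.bind (fun dd => pvRemoveWire dd v)) d0

theorem pv_getLast?_cons_or {α : Type} (a : α) (l : List α) (u : Option α) :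
    ((a :: l).getLast?).or u = (l.getLast?).or (some a) := by
  cases h : l.getLast? with
  | none =>
    have hl : l = [] := List.getLast?_eq_none_iff.mp h
    subst hl; simp
  | some y =>
    cases l with
    | nil => simp at h
    | cons c t => rw [List.getLast?_cons_cons, h]; simp

-- A's single items() scan, characterised
theorem pv_scan_pair (assigns : List (String × String)) (u0 : Option String)
    (d0 : Option (List String)) :
    assigns.foldl pvScanStep (u0, d0) =
      (((pvStarKeys assigns).getLast?).or u0, pvRemFold d0 (pvNonstarVals assigns)) := by
  induction assigns generalizing u0 d0 with
  | nil => simp [pvStarKeys, pvNonstarVals, pvRemFold]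
  | cons p rest ih =>
    obtain ⟨a, b⟩ := p
    by_cases hb : b = "*"
    · subst hb
      have h1 : pvStarKeys ((a, "*") :: rest) = a :: pvStarKeys rest := by
        simp [pvStarKeys]
      have h2 : pvNonstarVals ((a, "*") :: rest) = pvNonstarVals rest := by
        simp [pvNonstarVals]
      rw [List.foldl_cons]
      have hstep : pvScanStep (u0, d0) (a, "*") = (some a, d0) := by
        simp [pvScanStep]
      rw [hstep, ih, h1, h2, pv_getLast?_cons_or]
    · have h1 : pvStarKeys ((a, b) :: rest) = pvStarKeys rest := by
        simp [pvStarKeys, hb]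
      have h2 : pvNonstarVals ((a, b) :: rest) = b :: pvNonstarVals rest := by
        simp [pvNonstarVals, hb]
      rw [List.foldl_cons]
      have hstep : pvScanStep (u0, d0) (a, b) =
          (u0, d0.bind (fun d => pvRemoveWire d b)) := by
        simp [pvScanStep, hb]
      rw [hstep, ih, h1, h2]
      rfl

-- the removals of the scan, on valid values, leave exactly the pool of free wires
theorem pv_remFold_filter (vs : List String) :
    ∀ dom : List String, vs.Nodup → (∀ v ∈ vs, v ∈ dom) →
      pvRemFold (some dom) vs = some (dom.filter (fun w => !(vs.contains w))) := by
  induction vs with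
  | nil => intro dom _ _; simp [pvRemFold]
  | cons v vs ih =>
    intro dom hnd hsub
    have hv : v ∈ dom := hsub v (by simp)
    have hstep : pvRemFold (some dom) (v :: vs) =
        pvRemFold (some (dom.filter (fun w => w ≠ v))) vs := by
      simp [pvRemFold, pvRemoveWire, hv]
    rw [hstep, ih (dom.filter (fun w => w ≠ v)) hnd.of_cons]
    · congr 1
      rw [List.filter_filter]
      apply List.filter_congr
      intro w _
      rw [List.contains_cons, Bool.not_or]
      by_cases hwv : w = v <;> simp [hwv]
    · intro u hu
      have hud : u ∈ dom := hsub u (by simp [hu])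
      have hune : u ≠ v := by
        intro he; subst he
        rw [List.nodup_cons] at hnd; exact hnd.1 hu
      simp [List.mem_filter, hud, hune]

-- B's pool loop is A's sequence of removals, restricted to the non-'*' values
theorem pv_availLoop_eq_remFold (assigns : List (String × String)) :
    pvAvailLoop (assigns.map Prod.snd) = pvRemFold (some pvLetters) (pvNonstarVals assigns) := by
  unfold pvAvailLoop pvRemFold pvNonstarVals
  generalize (some pvLetters : Option (List String)) = d0
  induction assigns generalizing d0 with
  | nil => rfl
  | cons p rest ih =>
    obtain ⟨a, b⟩ := p
    by_cases hb : b = "*" <;> simp [hb, ih]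

theorem pv_starKeys_sublist (assigns : List (String × String)) :
    (pvStarKeys assigns).Sublist (assigns.map Prod.fst) :=
  List.Sublist.map Prod.fst List.filter_sublist

theorem pv_mem_starKeys (assigns : List (String × String)) (k : String)
    (h : k ∈ pvStarKeys assigns) : (k, "*") ∈ assigns := by
  unfold pvStarKeys at h
  obtain ⟨p, hp, hfst⟩ := List.mem_map.mp h
  rw [List.mem_filter] at hp
  have h2 : p.2 = "*" := by simpa using hp.2
  have : p = (k, "*") := by
    cases p; simp_all
  rw [this] at hp
  exact hp.1

-- keys are unchanged by overwriting an existing key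
theorem pv_setKey_keys (assigns : List (String × String)) (k w : String)
    (hk : k ∈ assigns.map Prod.fst) :
    (pvSetKey assigns k w).map Prod.fst = assigns.map Prod.fst := by
  induction assigns with
  | nil => simp at hk
  | cons p rest ih =>
    obtain ⟨a, b⟩ := p
    by_cases ha : a = k
    · subst ha; simp [pvSetKey]
    · have hk' : k ∈ rest.map Prod.fst := by
        rcases List.mem_cons.mp hk with h | h
        · exact absurd h.symm ha
        · exact h
      simp [pvSetKey, ha, ih hk']

-- filling the last '*' key removes exactly it from the star worklist
theorem pv_setKey_starKeys (assigns : List (String × String)) (k w : String)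
    (hnd : (assigns.map Prod.fst).Nodup) (hmem : (k, "*") ∈ assigns) (hw : w ≠ "*") :
    pvStarKeys (pvSetKey assigns k w) = (pvStarKeys assigns).erase k := by
  induction assigns with
  | nil => simp at hmem
  | cons p rest ih =>
    obtain ⟨a, b⟩ := p
    rw [List.map_cons, List.nodup_cons] at hnd
    by_cases ha : a = k
    · have hb : b = "*" := by
        rcases List.mem_cons.mp hmem with h | h
        · exact ((Prod.ext_iff.mp h).2).symm
        · exact absurd (ha ▸ List.mem_map.mpr ⟨(k, "*"), h, rfl⟩) hnd.1
      subst hb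
      simp [pvSetKey, pvStarKeys, ha, hw]
    · have hmem' : (k, "*") ∈ rest := by
        rcases List.mem_cons.mp hmem with h | h
        · exact absurd (congrArg Prod.fst h).symm ha
        · exact h
      by_cases hb : b = "*"
      · subst hb
        have hak : a ≠ k := ha
        rw [show pvSetKey ((a, "*") :: rest) k w = (a, "*") :: pvSetKey rest k w by
              simp [pvSetKey, ha]]
        have h1 : pvStarKeys ((a, "*") :: pvSetKey rest k w) =
            a :: pvStarKeys (pvSetKey rest k w) := by simp [pvStarKeys]
        have h2 : pvStarKeys ((a, "*") :: rest) = a :: pvStarKeys rest := by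
          simp [pvStarKeys]
        rw [h1, h2, ih hnd.2 hmem', List.erase_cons_tail]
        simp [hak]
      · rw [show pvSetKey ((a, b) :: rest) k w = (a, b) :: pvSetKey rest k w by
              simp [pvSetKey, ha]]
        have h1 : pvStarKeys ((a, b) :: pvSetKey rest k w) =
            pvStarKeys (pvSetKey rest k w) := by simp [pvStarKeys, hb]
        have h2 : pvStarKeys ((a, b) :: rest) = pvStarKeys rest := by
          simp [pvStarKeys, hb]
        rw [h1, h2, ih hnd.2 hmem']

-- filling a '*' key adds exactly that wire to the assigned values (up to order)
theorem pv_setKey_nonstar_perm (assigns : List (String × String)) (k w : String)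
    (hnd : (assigns.map Prod.fst).Nodup) (hmem : (k, "*") ∈ assigns) (hw : w ≠ "*") :
    (pvNonstarVals (pvSetKey assigns k w)).Perm (w :: pvNonstarVals assigns) := by
  induction assigns with
  | nil => simp at hmem
  | cons p rest ih =>
    obtain ⟨a, b⟩ := p
    rw [List.map_cons, List.nodup_cons] at hnd
    by_cases ha : a = k
    · have hb : b = "*" := by
        rcases List.mem_cons.mp hmem with h | h
        · exact ((Prod.ext_iff.mp h).2).symm
        · exact absurd (ha ▸ List.mem_map.mpr ⟨(k, "*"), h, rfl⟩) hnd.1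
      subst hb
      rw [show pvSetKey ((a, "*") :: rest) k w = (a, w) :: rest by simp [pvSetKey, ha]]
      have h1 : pvNonstarVals ((a, w) :: rest) = w :: pvNonstarVals rest := by
        simp [pvNonstarVals, hw]
      have h2 : pvNonstarVals ((a, "*") :: rest) = pvNonstarVals rest := by
        simp [pvNonstarVals]
      rw [h1, h2]
    · have hmem' : (k, "*") ∈ rest := by
        rcases List.mem_cons.mp hmem with h | h
        · exact absurd (congrArg Prod.fst h).symm ha
        · exact h
      rw [show pvSetKey ((a, b) :: rest) k w = (a, b) :: pvSetKey rest k w by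
            simp [pvSetKey, ha]]
      by_cases hb : b = "*"
      · subst hb
        have h1 : pvNonstarVals ((a, "*") :: pvSetKey rest k w) =
            pvNonstarVals (pvSetKey rest k w) := by simp [pvNonstarVals]
        have h2 : pvNonstarVals ((a, "*") :: rest) = pvNonstarVals rest := by
          simp [pvNonstarVals]
        rw [h1, h2]; exact ih hnd.2 hmem'
      · have h1 : pvNonstarVals ((a, b) :: pvSetKey rest k w) =
            b :: pvNonstarVals (pvSetKey rest k w) := by simp [pvNonstarVals, hb]
        have h2 : pvNonstarVals ((a, b) :: rest) = b :: pvNonstarVals rest := by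
          simp [pvNonstarVals, hb]
        rw [h1, h2]
        exact ((ih hnd.2 hmem').cons b).trans (List.Perm.swap w b _)

theorem pv_availOf_setKey (assigns : List (String × String)) (k w : String)
    (hnd : (assigns.map Prod.fst).Nodup) (hmem : (k, "*") ∈ assigns) (hw : w ≠ "*") :
    pvAvailOf (pvSetKey assigns k w) = (pvAvailOf assigns).filter (fun x => x ≠ w) := by
  have hperm := pv_setKey_nonstar_perm assigns k w hnd hmem hw
  have hcontains : ∀ x : String, ((pvNonstarVals (pvSetKey assigns k w)).contains x) =
      ((x == w) || (pvNonstarVals assigns).contains x) := by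
    intro x
    rw [Bool.eq_iff_iff]
    simp [hperm.mem_iff]
  unfold pvAvailOf
  rw [List.filter_filter]
  apply List.filter_congr
  intro x _
  rw [hcontains x, Bool.not_or]
  by_cases hxw : x = w <;>
    cases hc : (pvNonstarVals assigns).contains x <;> simp [hxw]

-- pvGoB unfolded once (the well-founded equation, stated without the dependent match)
theorem pvGoB_eq (patterns : List String) (assign : List (String × String))
    (avail stack : List String) :
    pvGoB patterns assign avail stack =
      match stack.getLast? with
      | none => some assign
      | some k =>
          pvLoopB (fun loc av => pvGoB patterns loc av stack.dropLast) patterns assign k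
            avail (PySem.List.sorted avail (fun x => x)) := by
  rw [pvGoB]
  rcases hx : stack.getLast? with _ | k <;> simp

-- the main lemma: A's fuelled recursion = B's stack recursion (order = the star stack in reverse)
theorem pv_goA_eq_goB (order : List String) :
    ∀ (fuel : Nat) (assigns : List (String × String)) (patterns : List String),
      (assigns.map Prod.fst).Nodup →
      (pvNonstarVals assigns).Nodup →
      (∀ v ∈ pvNonstarVals assigns, v ∈ pvLetters) →
      pvStarKeys assigns = order.reverse →
      order.length < fuel →
      pvGoA fuel assigns patterns = pvGoB patterns assigns (pvAvailOf assigns) (pvStarKeys assigns) := by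
  induction order with
  | nil =>
    intro fuel assigns patterns hk _ _ hord hfuel
    cases fuel with
    | zero => omega
    | succ n =>
      have hstars : pvStarKeys assigns = [] := by simpa using hord
      show pvGoA (n + 1) assigns patterns = _
      rw [pvGoA, pv_scan_pair, hstars, pvGoB_eq]
      simp
  | cons k rest ih =>
    intro fuel assigns patterns hk hnv hsub hord hfuel
    cases fuel with
    | zero => omega
    | succ n =>
      have hstars : pvStarKeys assigns = rest.reverse ++ [k] := by
        simpa using hord
      have hlast : (pvStarKeys assigns).getLast? = some k := by
        rw [hstars]; exact List.getLast?_concat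
      have hdrop : (pvStarKeys assigns).dropLast = rest.reverse := by
        rw [hstars]; exact List.dropLast_concat
      have hkmem : (k, "*") ∈ assigns :=
        pv_mem_starKeys assigns k (by rw [hstars]; simp)
      have hdom : pvRemFold (some pvLetters) (pvNonstarVals assigns) =
          some (pvAvailOf assigns) := by
        rw [pv_remFold_filter (pvNonstarVals assigns) pvLetters hnv hsub]
        rfl
      have hsorted : PySem.List.sorted (pvAvailOf assigns) (fun x => x) = pvAvailOf assigns := by
        apply PySem.List.sorted_eq_self_of_pairwise
        apply List.Pairwise.imp (fun {a b} (h : a < b) => le_of_lt h)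
        apply List.Pairwise.filter
        unfold pvLetters
        refine List.Pairwise.imp
          (fun {a b} hl => String.lt_iff_toList_lt.mpr hl) ?_
        decide
      show pvGoA (n + 1) assigns patterns = _
      rw [pvGoA, pv_scan_pair, hlast, hdom, pvGoB_eq, hlast, hdrop, hsorted]
      show pvLoopA (fun l => pvGoA n l patterns) assigns patterns k (pvAvailOf assigns) =
        pvLoopB (fun loc av => pvGoB patterns loc av rest.reverse) patterns assigns k
          (pvAvailOf assigns) (pvAvailOf assigns)
      -- the two for-loops agree element by element
      have loop : ∀ ds : List String, (∀ w ∈ ds, w ∈ pvAvailOf assigns) →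
          pvLoopA (fun l => pvGoA n l patterns) assigns patterns k ds =
          pvLoopB (fun loc av => pvGoB patterns loc av rest.reverse) patterns assigns k
            (pvAvailOf assigns) ds := by
        intro ds
        induction ds with
        | nil => intro _; rfl
        | cons w ws ihw =>
          intro hws
          have hwavail : w ∈ pvAvailOf assigns := hws w (by simp)
          have hwlet : w ∈ pvLetters := (List.mem_filter.mp hwavail).1
          have hwstar : w ≠ "*" := by
            have h7 : w = "a" ∨ w = "b" ∨ w = "c" ∨ w = "d" ∨ w = "e" ∨ w = "f" ∨
                w = "g" := by simpa [pvLetters] using hwlet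
            rcases h7 with h | h | h | h | h | h | h <;> subst h <;> decide
          have hwnv : w ∉ pvNonstarVals assigns := by
            have := (List.mem_filter.mp hwavail).2
            simpa using this
          have hstars' : pvStarKeys (pvSetKey assigns k w) = rest.reverse := by
            have hnds : (pvStarKeys assigns).Nodup :=
              (pv_starKeys_sublist assigns).nodup hk
            have hknr : k ∉ rest.reverse := by
              rw [hstars] at hnds
              intro hmemk
              exact (List.disjoint_of_nodup_append hnds) hmemk (by simp)
            rw [pv_setKey_starKeys assigns k w hk hkmem hwstar, hstars,
                List.erase_append_right _ hknr]
            simp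
          have hrec : pvGoA n (pvSetKey assigns k w) patterns =
              pvGoB patterns (pvSetKey assigns k w)
                ((pvAvailOf assigns).filter (fun x => x ≠ w)) rest.reverse := by
            rw [← pv_availOf_setKey assigns k w hk hkmem hwstar, ← hstars']
            apply ih n (pvSetKey assigns k w) patterns
            · rw [pv_setKey_keys assigns k w
                    (List.mem_map.mpr ⟨(k, "*"), hkmem, rfl⟩)]
              exact hk
            · exact ((pv_setKey_nonstar_perm assigns k w hk hkmem hwstar).nodup_iff).mpr
                (List.nodup_cons.mpr ⟨hwnv, hnv⟩)
            · intro v hv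
              have := (pv_setKey_nonstar_perm assigns k w hk hkmem hwstar).mem_iff.mp hv
              rcases List.mem_cons.mp this with h | h
              · subst h; exact hwlet
              · exact hsub v h
            · exact hstars'
            · simp only [List.length_cons] at hfuel; omega
          have hdiff : PySem.Set.diff (pvAvailOf assigns) [w] =
              (pvAvailOf assigns).filter (fun x => x ≠ w) := by
            simp [PySem.Set.diff]
          rw [pvLoopA, pvLoopB, hdiff]
          cases hc : pvConsistent (pvSetKey assigns k w) patterns with
          | none => rfl
          | some b =>
            cases b with
            | false => exact ihw (fun u hu => hws u (by simp [hu]))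
            | true =>
              rw [hrec]
              cases pvGoB patterns (pvSetKey assigns k w)
                  ((pvAvailOf assigns).filter (fun x => x ≠ w)) rest.reverse with
              | some r => rfl
              | none => exact ihw (fun u hu => hws u (by simp [hu]))
      exact loop (pvAvailOf assigns) (fun w hw => hw)

-- ===== VERDICT (by name: the statement is the Claim_ definition above) =====
theorem backward_search_spec : Claim_equal_backward_search := by
  intro assigns patterns _ hpre
  obtain ⟨hk, hnv, hsub, _, _⟩ := hpre
  unfold Spec_backward_search backward_search backward_search_alt
  rw [pv_availLoop_eq_remFold, pv_remFold_filter (pvNonstarVals assigns) pvLetters hnv hsub]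
  show pvGoA (assigns.length + 1) assigns patterns =
    pvGoB patterns assigns (pvAvailOf assigns) (pvStarKeys assigns)
  apply pv_goA_eq_goB (pvStarKeys assigns).reverse (assigns.length + 1) assigns patterns
    hk hnv hsub (by simp)
  have := (pv_starKeys_sublist assigns).length_le
  simp at this ⊢
  omega
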